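-- pv_equiv track=rewrite | github.com/alan-turing-institute/autocast | src/autocast/scripts/plot_dataset_comparisons.py | arch_key_from_processor_segment
-- ===== SOURCE A (Python) =====
-- ARCHITECTURE_PREFIXES = (
--     "flow_matching_vit",
--     "flow_matching_large",
--     "flow_matching",
--     "fno_concat",
--     "fno",
--     "vit_latent",
--     "vit_large",
--     "vit",
--     "diffusion_vit",
--     "diffusion",
--     "unet_large",
--     "unet",
--     "swin",
--     "unet_azula_large",
--     "unet_azula_small",
--     "unet_large_concat",
--     "unet_small_concat",
--     "swin_large",
--     "swin_small",
--     "vit_azula_large",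
--     "vit_azula_small",
-- )
--
-- def arch_key_from_processor_segment(segment: str) -> str:
--     """Map a processor name segment to a canonical architecture key."""
--     seg = str(segment)
--     if not seg:
--         return "unknown"
--     for pref in sorted(ARCHITECTURE_PREFIXES, key=len, reverse=True):
--         if seg == pref or seg.startswith(pref + "_"):
--             return pref
--     return seg.split("_")[0]
-- ===== SOURCE B (Python) =====
-- ARCHITECTURE_PREFIXES = (
--     "flow_matching_vit",
--     "flow_matching_large",
--     "flow_matching",
--     "fno_concat",
--     "fno",
--     "vit_latent",
--     "vit_large",
--     "vit",
--     "diffusion_vit",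
--     "diffusion",
--     "unet_large",
--     "unet",
--     "swin",
--     "unet_azula_large",
--     "unet_azula_small",
--     "unet_large_concat",
--     "unet_small_concat",
--     "swin_large",
--     "swin_small",
--     "vit_azula_large",
--     "vit_azula_small",
-- )
--
-- ARCH_PREFIX_SET = frozenset(ARCHITECTURE_PREFIXES)
--
-- def arch_key_from_processor_segment(segment: str) -> str:
--     """Map a processor name segment to a canonical architecture key."""
--     seg = str(segment)
--     if not seg:
--         return "unknown"
--     parts = seg.split("_")
--     for i in range(len(parts), 0, -1):
--         candidate = "_".join(parts[:i])
--         if candidate in ARCH_PREFIX_SET: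
--             return candidate
--     return parts[0]
-- ===== Notes on version B (the rewrite author's own statement) =====
-- stated objective: alternative
-- what changed: Instead of length-sorting the prefix table on every call and scanning it with startswith, B splits the segment at underscore boundaries once and probes the segment's own boundary prefixes, longest first, against a precomputed set of the table.
import Mathlib
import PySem

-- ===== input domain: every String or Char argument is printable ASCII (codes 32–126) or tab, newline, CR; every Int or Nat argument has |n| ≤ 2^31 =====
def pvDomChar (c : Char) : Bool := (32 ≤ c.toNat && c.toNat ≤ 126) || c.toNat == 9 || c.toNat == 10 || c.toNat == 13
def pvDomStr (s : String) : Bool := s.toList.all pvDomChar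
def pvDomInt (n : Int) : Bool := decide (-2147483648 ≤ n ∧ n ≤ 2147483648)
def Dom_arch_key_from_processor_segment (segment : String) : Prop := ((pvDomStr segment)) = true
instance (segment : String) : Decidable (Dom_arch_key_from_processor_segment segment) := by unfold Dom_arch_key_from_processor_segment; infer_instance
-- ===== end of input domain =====

-- B probes the segment's own underscore-boundary prefixes (longest first) against a precomputed
-- set, instead of A's per-call length-sort of the prefix table and startswith scan; same return
-- value everywhere (objective: alternative).

-- ===== PORT A =====
def ARCHITECTURE_PREFIXES : List String :=
  ["flow_matching_vit", "flow_matching_large", "flow_matching", "fno_concat", "fno",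
   "vit_latent", "vit_large", "vit", "diffusion_vit", "diffusion", "unet_large", "unet",
   "swin", "unet_azula_large", "unet_azula_small", "unet_large_concat", "unet_small_concat",
   "swin_large", "swin_small", "vit_azula_large", "vit_azula_small"]

-- seg.split("_")[0] of A's last line; "_" is non-empty so split? is always `some`
def archSplitParts (seg : String) : List String :=
  match PySem.Str.split? seg "_" with
  | some ps => ps
  | none => []

-- A's for-loop with early return; the [] case is A's fall-through `return seg.split("_")[0]`
-- (IndexError impossible: str.split never returns an empty list).
-- `pref + "_"` is formed at the char-list level (String.append is opaque to the kernel).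
def archFindA (seg : String) : List String → String
  | [] =>
    match PySem.List.pyGet? (archSplitParts seg) 0 with
    | some x => x
    | none => ""
  | pref :: rest =>
    if seg == pref || PySem.Chars.startswith seg.toList (pref.toList ++ ['_']) then pref
    else archFindA seg rest

def arch_key_from_processor_segment (segment : String) : String :=
  let seg := segment    -- str(segment) is the identity on str
  if seg = "" then "unknown"
  else archFindA seg (PySem.List.sorted ARCHITECTURE_PREFIXES (fun p => PySem.Str.len p) true)

-- ===== PORT B =====
def ARCH_PREFIX_SET : PySem.Set String := PySem.Set.ofList ARCHITECTURE_PREFIXES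

-- B's for-loop over i = len(parts) .. 1 with early return; [] case is `return parts[0]`
-- (IndexError impossible: str.split never returns an empty list).
def altLoop (parts : List String) : List Int → String
  | [] =>
    match PySem.List.pyGet? parts 0 with
    | some x => x
    | none => ""
  | i :: rest =>
    let candidate := PySem.Str.join "_" (PySem.List.slice parts none (some i))
    if PySem.Set.contains ARCH_PREFIX_SET candidate then candidate
    else altLoop parts rest

def arch_key_from_processor_segment_alt (segment : String) : String :=
  let seg := segment    -- str(segment) is the identity on str
  if seg = "" then "unknown"
  else
    let parts := match PySem.Str.split? seg "_" with
      | some ps => ps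
      | none => []
    altLoop parts (PySem.List.pyRange (parts.length : Int) 0 (-1))

-- ===== PRECONDITION & SPEC =====
def Spec_arch_key_from_processor_segment (segment : String) (out : String) : Prop := out = arch_key_from_processor_segment_alt segment
instance (segment : String) (out : String) : Decidable (Spec_arch_key_from_processor_segment segment out) := by unfold Spec_arch_key_from_processor_segment; infer_instance

-- ===== CLAIM (what is proved, stated in full; the proofs are below) =====
def Claim_equal_arch_key_from_processor_segment : Prop := ∀ (segment : String), Dom_arch_key_from_processor_segment segment → Spec_arch_key_from_processor_segment segment (arch_key_from_processor_segment segment)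

-- ===== LEMMAS AND PROOFS =====

-- Python's s.split("_") as a simple structural recursion (cur = current chunk, reversed)
def splitU : List Char → List Char → List (List Char)
  | [], cur => [cur.reverse]
  | c :: r, cur => if c = '_' then cur.reverse :: splitU r [] else splitU r (c :: cur)

theorem splitU_ne_nil (l : List Char) : ∀ cur, splitU l cur ≠ [] := by
  induction l with
  | nil => intro cur; simp [splitU]
  | cons c r ih => intro cur; simp only [splitU]; split_ifs <;> simp [ih]

theorem go_eq (fuel : Nat) : ∀ (l cur : List Char) (acc : List (List Char)),
    l.length < fuel →
    PySem.Chars.splitOn.go ['_'] fuel l cur acc = acc.reverse ++ splitU l cur := by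
  induction fuel with
  | zero => intro l cur acc h; omega
  | succ n ih =>
    intro l cur acc h
    cases l with
    | nil => simp [PySem.Chars.splitOn.go, splitU]
    | cons c r =>
      by_cases hc : c = '_'
      · subst hc
        have hpre : List.isPrefixOf ['_'] ('_' :: r) = true := by simp [List.isPrefixOf]
        simp only [PySem.Chars.splitOn.go, hpre, if_true]
        rw [show List.drop ['_'].length ('_' :: r) = r from rfl,
            ih r [] (cur.reverse :: acc) (by simpa using Nat.lt_of_succ_lt_succ h)]
        simp [splitU]
      · have hpre : List.isPrefixOf ['_'] (c :: r) = false := by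
          simp [List.isPrefixOf]; exact fun h' => (hc h'.symm).elim
        simp only [PySem.Chars.splitOn.go, hpre]
        rw [if_neg (by simp)]
        rw [ih r (c :: cur) acc (by simpa using Nat.lt_of_succ_lt_succ h)]
        simp [splitU, hc]

theorem splitOn_eq (cs : List Char) : PySem.Chars.splitOn cs ['_'] = splitU cs [] := by
  have := go_eq (cs.length + 1) cs [] [] (by omega)
  simpa [PySem.Chars.splitOn] using this

theorem inter_cons (sep x : List Char) (ys : List (List Char)) (h : ys ≠ []) :
    List.intercalate sep (x :: ys) = x ++ sep ++ List.intercalate sep ys := by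
  cases ys with
  | nil => exact absurd rfl h
  | cons y ys' => simp [List.intercalate, List.intersperse]

theorem inter_append (sep : List Char) (xs ys : List (List Char)) (hx : xs ≠ []) (hy : ys ≠ []) :
    List.intercalate sep (xs ++ ys) = List.intercalate sep xs ++ sep ++ List.intercalate sep ys := by
  induction xs with
  | nil => exact absurd rfl hx
  | cons x rest ih =>
    cases rest with
    | nil =>
      simp only [List.cons_append, List.nil_append]
      rw [inter_cons sep x ys hy]
      simp [List.intercalate]
    | cons a b =>
      rw [List.cons_append, inter_cons sep x ((a :: b) ++ ys) (by simp),
          ih (by simp), inter_cons sep x (a :: b) (by simp)]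
      simp [List.append_assoc]

theorem splitU_join (l : List Char) : ∀ cur, List.intercalate ['_'] (splitU l cur) = cur.reverse ++ l := by
  induction l with
  | nil => intro cur; simp [splitU, List.intercalate]
  | cons c r ih =>
    intro cur
    by_cases hc : c = '_'
    · subst hc
      simp only [splitU, if_true]
      rw [inter_cons _ _ _ (splitU_ne_nil r []), ih []]
      simp
    · simp only [splitU, if_neg hc]
      rw [ih (c :: cur)]
      simp

theorem splitU_append (a : List Char) (b : List Char) :
    ∀ cur, splitU (a ++ '_' :: b) cur = splitU a cur ++ splitU b [] := by
  induction a with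
  | nil => intro cur; simp [splitU]
  | cons c r ih =>
    intro cur
    by_cases hc : c = '_'
    · subst hc; simp [splitU, ih]
    · simp [splitU, hc, ih]

-- B's candidate list: "_".join(parts[:i]) for i = len(parts) .. 1
def candsOf (parts : List (List Char)) : List (List Char) :=
  ((List.range' 1 parts.length).reverse).map (fun i => List.intercalate ['_'] (parts.take i))

theorem mem_cands_iff (cs p : List Char) :
    p ∈ candsOf (splitU cs []) ↔ (cs = p ∨ (p ++ ['_']) <+: cs) := by
  constructor
  · intro hp
    simp only [candsOf, List.mem_map, List.mem_reverse, List.mem_range'_1] at hp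
    obtain ⟨i, ⟨hi1, hi2⟩, rfl⟩ := hp
    set parts := splitU cs [] with hparts
    by_cases hin : i = parts.length
    · left
      rw [hin, List.take_of_length_le (le_refl _)]
      simpa using (splitU_join cs []).symm
    · right
      have hilt : i < parts.length := by omega
      have htake : parts.take i ≠ [] := by
        simp only [ne_eq, List.take_eq_nil_iff]
        push_neg
        exact ⟨by omega, splitU_ne_nil cs []⟩
      have hdrop : parts.drop i ≠ [] := by
        simp only [ne_eq, List.drop_eq_nil_iff]; omega
      have hcs : cs = List.intercalate ['_'] parts := by simpa using (splitU_join cs []).symm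
      refine ⟨List.intercalate ['_'] (parts.drop i), ?_⟩
      rw [hcs]
      conv_rhs => rw [← List.take_append_drop i parts]
      rw [inter_append _ _ _ htake hdrop]
  · intro hp
    rcases hp with rfl | ⟨t, ht⟩
    · have hne := splitU_ne_nil cs []
      have hlen : 1 ≤ (splitU cs []).length := List.length_pos_iff.mpr hne
      simp only [candsOf, List.mem_map, List.mem_reverse, List.mem_range'_1]
      exact ⟨(splitU cs []).length, ⟨hlen, by omega⟩,
        by rw [List.take_of_length_le (le_refl _)]; simpa using splitU_join cs []⟩
    · have hcs : cs = p ++ '_' :: t := by simpa [List.append_assoc] using ht.symm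
      subst hcs
      have hsplit : splitU (p ++ '_' :: t) [] = splitU p [] ++ splitU t [] := splitU_append p t []
      have hk1 : 1 ≤ (splitU p []).length := List.length_pos_iff.mpr (splitU_ne_nil p [])
      have hlen : (splitU (p ++ '_' :: t) []).length
          = (splitU p []).length + (splitU t []).length := by rw [hsplit]; simp
      have ht1 : 1 ≤ (splitU t []).length := List.length_pos_iff.mpr (splitU_ne_nil t [])
      simp only [candsOf, List.mem_map, List.mem_reverse, List.mem_range'_1]
      refine ⟨(splitU p []).length, ⟨hk1, by omega⟩, ?_⟩
      rw [hsplit, List.take_left]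
      simpa using splitU_join p []

theorem candLen_mono (parts : List (List Char)) (hp : parts ≠ []) {i j : Nat}
    (h1 : 1 ≤ i) (hij : i < j) (hj : j ≤ parts.length) :
    (List.intercalate ['_'] (parts.take i)).length < (List.intercalate ['_'] (parts.take j)).length := by
  have htt : (parts.take j).take i = parts.take i := by
    rw [List.take_take]; congr 1; omega
  have hlenj : (parts.take j).length = j := by
    rw [List.length_take]; omega
  have htake : (parts.take j).take i ≠ [] := by
    simp only [ne_eq, List.take_eq_nil_iff]
    push_neg
    refine ⟨by omega, ?_⟩
    simp only [ne_eq, List.take_eq_nil_iff]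
    push_neg
    exact ⟨by omega, hp⟩
  have hdrop : (parts.take j).drop i ≠ [] := by
    simp only [ne_eq, List.drop_eq_nil_iff]; omega
  conv_rhs => rw [← List.take_append_drop i (parts.take j)]
  rw [inter_append _ _ _ htake hdrop, htt]
  simp

theorem cands_pairwise (parts : List (List Char)) (hp : parts ≠ []) :
    (candsOf parts).Pairwise (fun a b => b.length < a.length) := by
  unfold candsOf
  rw [List.pairwise_map]
  rw [List.pairwise_reverse]
  have base : (List.range' 1 parts.length).Pairwise (· < ·) := List.pairwise_lt_range' 1
  refine base.imp_of_mem ?_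
  intro a b ha hb hab
  rw [List.mem_range'_1] at ha hb
  exact candLen_mono parts hp ha.1 hab (by omega)

-- generic: first match scanning a weakly length-descending list L for membership in a strictly
-- length-descending list C equals the first element of C that lies in L
theorem find_comm {α : Type} [DecidableEq α] (f : α → Nat) (L C : List α)
    (hL : L.Pairwise (fun a b => f b ≤ f a)) (hC : C.Pairwise (fun a b => f b < f a)) :
    L.find? (fun p => decide (p ∈ C)) = C.find? (fun c => decide (c ∈ L)) := by
  cases hfL : L.find? (fun p => decide (p ∈ C)) with
  | none =>
    cases hfC : C.find? (fun c => decide (c ∈ L)) with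
    | none => rfl
    | some b =>
      rw [List.find?_eq_none] at hfL
      have hbC : b ∈ C := List.mem_of_find?_eq_some hfC
      have hbL : b ∈ L := by simpa using List.find?_some hfC
      exact absurd (by simpa using hbC) (by simpa using hfL b hbL)
  | some a =>
    have haC : a ∈ C := by simpa using List.find?_some hfL
    have ⟨_, l1, l2, hLdec, hl1⟩ := List.find?_eq_some_iff_append.mp hfL
    have haL : a ∈ L := by rw [hLdec]; simp
    cases hfC : C.find? (fun c => decide (c ∈ L)) with
    | none =>
      rw [List.find?_eq_none] at hfC
      exact absurd (by simpa using haL) (by simpa using hfC a haC)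
    | some b =>
      have hbL : b ∈ L := by simpa using List.find?_some hfC
      have ⟨_, c1, c2, hCdec, hc1⟩ := List.find?_eq_some_iff_append.mp hfC
      have hbC : b ∈ C := by rw [hCdec]; simp
      congr 1
      by_contra hne
      -- a ∈ C but not in c1 (c1 avoids L) → a ∈ c2 → f a < f b
      have hanotc1 : a ∉ c1 := fun hmem => by simpa [haL] using hc1 a hmem
      have hac2 : a ∈ c2 := by
        have : a ∈ c1 ++ b :: c2 := by rw [← hCdec]; exact haC
        rcases List.mem_append.mp this with h | h
        · exact absurd h hanotc1
        · rcases List.mem_cons.mp h with h | h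
          · exact absurd h hne
          · exact h
      have hfab : f a < f b := by
        have hpw : (c1 ++ b :: c2).Pairwise (fun a b => f b < f a) := by rw [← hCdec]; exact hC
        have := (List.pairwise_append.mp hpw).2.1
        exact (List.pairwise_cons.mp this).1 a hac2
      -- b ∈ L but not in l1 (l1 avoids C) → b ∈ l2 → f b ≤ f a
      have hbnotl1 : b ∉ l1 := fun hmem => by simpa [hbC] using hl1 b hmem
      have hbl2 : b ∈ l2 := by
        have : b ∈ l1 ++ a :: l2 := by rw [← hLdec]; exact hbL
        rcases List.mem_append.mp this with h | h
        · exact absurd h hbnotl1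
        · rcases List.mem_cons.mp h with h | h
          · exact absurd h (fun hh => hne hh.symm)
          · exact h
      have hfba : f b ≤ f a := by
        have hpw : (l1 ++ a :: l2).Pairwise (fun a b => f b ≤ f a) := by rw [← hLdec]; exact hL
        have := (List.pairwise_append.mp hpw).2.1
        exact (List.pairwise_cons.mp this).1 b hbl2
      omega

-- the table sorted by length, reverse=True (stable), as a literal
def SORTED_PREFIXES : List String :=
  ["flow_matching_large", "flow_matching_vit", "unet_large_concat", "unet_small_concat",
   "unet_azula_large", "unet_azula_small", "vit_azula_large", "vit_azula_small",
   "flow_matching", "diffusion_vit", "fno_concat", "vit_latent", "unet_large", "swin_large",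
   "swin_small", "vit_large", "diffusion", "unet", "swin", "fno", "vit"]

theorem sorted_eq_lit :
    PySem.List.sorted ARCHITECTURE_PREFIXES (fun p => PySem.Str.len p) true = SORTED_PREFIXES := by
  decide

theorem sorted_pairwise_len :
    SORTED_PREFIXES.Pairwise (fun a b => b.toList.length ≤ a.toList.length) := by decide

theorem sorted_perm_lit : SORTED_PREFIXES.Perm ARCHITECTURE_PREFIXES := by decide

theorem archFindA_eq (seg : String) (L : List String) :
    archFindA seg L =
      (L.find? (fun pref => seg == pref || PySem.Chars.startswith seg.toList (pref.toList ++ ['_']))).getD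
        (match PySem.List.pyGet? (archSplitParts seg) 0 with
         | some x => x
         | none => "") := by
  induction L with
  | nil => simp [archFindA, List.find?]
  | cons p rest ih =>
    simp only [archFindA, List.find?]
    split_ifs with h
    · simp [h]
    · simp only [Bool.not_eq_true] at h
      rw [h]
      simpa using ih

theorem altLoop_eq (parts : List String) (is : List Int) :
    altLoop parts is =
      ((is.map (fun i => PySem.Str.join "_" (PySem.List.slice parts none (some i)))).find?
          (fun c => PySem.Set.contains ARCH_PREFIX_SET c)).getD
        (match PySem.List.pyGet? parts 0 with
         | some x => x
         | none => "") := by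
  induction is with
  | nil => simp [altLoop, List.find?]
  | cons i rest ih =>
    simp only [altLoop, List.map]
    cases hx : PySem.Set.contains ARCH_PREFIX_SET
        (PySem.Str.join "_" (PySem.List.slice parts none (some i))) with
    | true =>
      rw [if_pos rfl, List.find?_cons_of_pos (by simpa using hx)]
      simp
    | false =>
      rw [if_neg (by simp), List.find?_cons_of_neg (by simpa using hx)]
      exact ih

theorem pyRange_down (n : Nat) :
    PySem.List.pyRange (n : Int) 0 (-1) = ((List.range' 1 n).reverse).map (fun k : Nat => (k : Int)) := by
  rw [List.reverse_range', List.map_map]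
  simp only [PySem.List.pyRange]
  rw [if_neg (by norm_num), if_neg (by norm_num : ¬ (0:Int) < -1)]
  cases Nat.eq_zero_or_pos n with
  | inl h => subst h; simp
  | inr h =>
    rw [if_pos (by exact_mod_cast h)]
    have hcnt : (((n : Int) - 0 + - -1 - 1) / - -1).toNat = n := by norm_num
    rw [hcnt]
    apply List.map_congr_left
    intro k hk
    rw [List.mem_range] at hk
    simp only [Function.comp]
    omega

theorem string_toList_inj {s t : String} (h : s.toList = t.toList) : s = t := by
  have := congrArg String.ofList h
  simpa [String.ofList_toList] using this

-- ===== main proof =====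
theorem main_eq (seg : String) (hne : seg ≠ "") :
    arch_key_from_processor_segment seg = arch_key_from_processor_segment_alt seg := by
  classical
  set cs := seg.toList with hcs
  set partsC := splitU cs [] with hpartsC
  set partsS := partsC.map String.ofList with hpartsS
  set CS := (candsOf partsC).map String.ofList with hCS
  -- the split step, shared by both ports
  have hsplit : (match PySem.Str.split? seg "_" with
                 | some ps => ps
                 | none => []) = partsS := by
    have h1 : PySem.Str.split? seg "_" = some partsS := by
      simp [PySem.Str.split?, PySem.Chars.split?, splitOn_eq, hpartsS, hpartsC, hcs]
    rw [h1]
  have hfb : archSplitParts seg = partsS := by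
    simpa [archSplitParts] using hsplit
  have hnC : partsS.length = partsC.length := by simp [hpartsS]
  -- B's candidate list is CS
  have hBcands : (PySem.List.pyRange (partsS.length : Int) 0 (-1)).map
        (fun i => PySem.Str.join "_" (PySem.List.slice partsS none (some i)))
      = CS := by
    rw [hnC, pyRange_down, List.map_map, hCS]
    simp only [candsOf, List.map_map]
    apply List.map_congr_left
    intro k _
    simp only [Function.comp]
    rw [PySem.List.slice_to partsS (by positivity)]
    simp only [Int.toNat_natCast]
    have : (partsS.take k).map String.toList = partsC.take k := by
      rw [hpartsS, ← List.map_take, List.map_map,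
          show String.toList ∘ String.ofList = id from funext (fun _ => String.toList_ofList),
          List.map_id]
    simp [PySem.Str.join, PySem.Chars.join, this]
  -- predicate of A = membership in CS
  have hpred : ∀ p : String,
      (seg == p || PySem.Chars.startswith seg.toList (p.toList ++ ['_'])) = decide (p ∈ CS) := by
    intro p
    have hiff : (seg = p ∨ (p.toList ++ ['_']) <+: cs) ↔ p ∈ CS := by
      rw [hCS]
      constructor
      · intro h
        have : p.toList ∈ candsOf partsC := by
          rw [hpartsC]
          apply (mem_cands_iff cs p.toList).mpr
          rcases h with rfl | h
          · left; rfl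
          · right; exact h
        exact List.mem_map.mpr ⟨p.toList, this, String.ofList_toList⟩
      · intro h
        obtain ⟨q, hq, rfl⟩ := List.mem_map.mp h
        have : (String.ofList q).toList = q := String.toList_ofList
        rw [hpartsC] at hq
        have h2 := (mem_cands_iff cs q).mp hq
        rcases h2 with h2 | h2
        · left; exact string_toList_inj (by rw [this, ← h2])
        · right; rw [this]; exact h2
    rw [Bool.eq_iff_iff]
    simp only [Bool.or_eq_true, beq_iff_eq, decide_eq_true_eq]
    rw [← hiff]
    constructor
    · rintro (h | h)
      · exact Or.inl h
      · exact Or.inr (by rwa [PySem.Chars.startswith_iff] at h)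
    · rintro (h | h)
      · exact Or.inl h
      · exact Or.inr (by rwa [PySem.Chars.startswith_iff])
  -- predicate of B = membership in SORTED_PREFIXES
  have hpredB : ∀ c : String,
      (PySem.Set.contains ARCH_PREFIX_SET c) = decide (c ∈ SORTED_PREFIXES) := by
    intro c
    rw [Bool.eq_iff_iff]
    simp only [decide_eq_true_eq]
    rw [PySem.Set.contains_iff, ARCH_PREFIX_SET, PySem.Set.mem_ofList]
    exact ⟨fun h => sorted_perm_lit.mem_iff.mpr h, fun h => sorted_perm_lit.mem_iff.mp h⟩
  -- pairwise facts
  have hCpair : CS.Pairwise (fun a b => b.toList.length < a.toList.length) := by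
    rw [hCS, List.pairwise_map]
    refine (cands_pairwise partsC (by rw [hpartsC]; exact splitU_ne_nil cs [])).imp ?_
    intro a b h
    simpa [String.toList_ofList] using h
  -- assemble
  unfold arch_key_from_processor_segment arch_key_from_processor_segment_alt
  simp only [if_neg hne]
  rw [sorted_eq_lit, archFindA_eq, hsplit, altLoop_eq, hfb]
  congr 1
  rw [hBcands]
  have e1 : (fun pref => seg == pref || PySem.Chars.startswith seg.toList (pref.toList ++ ['_']))
      = fun p => decide (p ∈ CS) := funext hpred
  have e2 : (fun c => PySem.Set.contains ARCH_PREFIX_SET c)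
      = fun c => decide (c ∈ SORTED_PREFIXES) := funext hpredB
  rw [e1, e2]
  exact find_comm (fun s => s.toList.length) SORTED_PREFIXES CS sorted_pairwise_len hCpair

-- ===== VERDICT (by name: the statement is the Claim_ definition above) =====
theorem arch_key_from_processor_segment_spec : Claim_equal_arch_key_from_processor_segment := by
  intro segment _
  unfold Spec_arch_key_from_processor_segment
  by_cases h : segment = ""
  · subst h; rfl
  · exact main_eq segment h
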